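-- pv_equiv track=rewrite | github.com/binbinsh/notion-caldav-sync | src/app/constants.py | is_task_properties
-- ===== SOURCE A (Python) =====
-- from typing import Optional, Dict, Mapping
--
-- def is_task_properties(props: Optional[Dict]) -> bool:
--     if not isinstance(props, dict):
--         return False
--
--     has_date = any(
--         isinstance(value, dict) and value.get("type") == "date"
--         for value in props.values()
--     )
--     if not has_date:
--         return False
--
--     has_status = any(
--         isinstance(value, dict) and value.get("type") in ("status", "select")
--         for value in props.values()
--     )
--     return has_status
-- ===== SOURCE B (Python) =====
-- def is_task_properties(props):
--     if not isinstance(props, dict):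
--         return False
--     has_date = False
--     has_status = False
--     for value in props.values():
--         if isinstance(value, dict):
--             t = value.get("type")
--             if t == "date":
--                 has_date = True
--             elif t in ("status", "select"):
--                 has_status = True
--             if has_date and has_status:
--                 return True
--     return has_date and has_status
-- ===== Notes on version B (the rewrite author's own statement) =====
-- stated objective: alternative
-- what changed: Replaces A's two separate any() scans over props.values() with one explicit pass maintaining has_date/has_status flags and returning True early as soon as both are set.
import Mathlib
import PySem

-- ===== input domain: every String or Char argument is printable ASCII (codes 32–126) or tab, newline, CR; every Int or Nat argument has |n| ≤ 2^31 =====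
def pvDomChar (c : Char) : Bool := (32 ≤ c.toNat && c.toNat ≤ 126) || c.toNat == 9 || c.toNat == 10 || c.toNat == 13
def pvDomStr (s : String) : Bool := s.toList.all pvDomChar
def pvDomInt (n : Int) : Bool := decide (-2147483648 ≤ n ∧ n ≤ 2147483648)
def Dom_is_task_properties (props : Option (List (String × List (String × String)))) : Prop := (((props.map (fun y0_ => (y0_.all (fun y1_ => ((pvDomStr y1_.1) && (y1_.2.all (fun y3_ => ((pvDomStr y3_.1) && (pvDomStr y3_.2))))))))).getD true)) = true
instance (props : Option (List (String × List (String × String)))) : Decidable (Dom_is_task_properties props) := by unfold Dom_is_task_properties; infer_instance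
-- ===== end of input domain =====

-- ===== PORT A =====
-- A: guard (None → false), then two separate any-scans over the values.
-- value.get("type") is first-match lookup; isinstance(value, dict) is always true at this type.
def is_task_properties (props : Option (List (String × List (String × String)))) : Bool :=
  match props with
  | none => false
  | some d =>
    let has_date := d.any (fun kv => PySem.Dict.get? (PySem.Dict.mk kv.2) "type" == some "date")
    if !has_date then false
    else
      d.any (fun kv =>
        let t := PySem.Dict.get? (PySem.Dict.mk kv.2) "type"
        t == some "status" || t == some "select")

-- ===== PORT B =====
-- B: one explicit pass keeping two flags, early exit when both are set.
def is_task_properties_altLoop : List (String × List (String × String)) → Bool → Bool → Bool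
  | [], has_date, has_status => has_date && has_status
  | v :: rest, has_date, has_status =>
    let t := PySem.Dict.get? (PySem.Dict.mk v.2) "type"
    let has_date' := if t == some "date" then true else has_date
    let has_status' :=
      if t != some "date" && (t == some "status" || t == some "select") then true else has_status
    if has_date' && has_status' then true
    else is_task_properties_altLoop rest has_date' has_status'

def is_task_properties_alt (props : Option (List (String × List (String × String)))) : Bool :=
  match props with
  | none => false
  | some d => is_task_properties_altLoop d false false

-- ===== PRECONDITION & SPEC =====
def Spec_is_task_properties (props : Option (List (String × List (String × String)))) (out : Bool) : Prop := out = is_task_properties_alt props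
instance (props : Option (List (String × List (String × String)))) (out : Bool) : Decidable (Spec_is_task_properties props out) := by unfold Spec_is_task_properties; infer_instance

-- ===== CLAIM (what is proved, stated in full; the proofs are below) =====
def Claim_equal_is_task_properties : Prop := ∀ (props : Option (List (String × List (String × String)))), Dom_is_task_properties props → Spec_is_task_properties props (is_task_properties props)

-- ===== LEMMAS AND PROOFS =====
theorem altLoop_eq (l : List (String × List (String × String))) :
    ∀ hd hs : Bool,
      is_task_properties_altLoop l hd hs =
        ((hd || l.any (fun kv => PySem.Dict.get? (PySem.Dict.mk kv.2) "type" == some "date")) &&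
         (hs || l.any (fun kv =>
            let t := PySem.Dict.get? (PySem.Dict.mk kv.2) "type"
            t == some "status" || t == some "select"))) := by
  induction l with
  | nil => intro hd hs; simp [is_task_properties_altLoop]
  | cons v rest ih =>
    intro hd hs
    simp only [is_task_properties_altLoop, List.any_cons]
    by_cases hD : PySem.Dict.get? (PySem.Dict.mk v.2) "type" == some "date"
    · have hS : (PySem.Dict.get? (PySem.Dict.mk v.2) "type" == some "status"
            || PySem.Dict.get? (PySem.Dict.mk v.2) "type" == some "select") = false := by
        have hEq : PySem.Dict.get? (PySem.Dict.mk v.2) "type" = some "date" := by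
          exact eq_of_beq hD
        simp [hEq]
      by_cases hdhs : ((if (true : Bool) == true then true else hd) = true ∧ hs = true)
      · simp [hD, hS, hdhs.2]
      · simp only [hD, hS]
        rw [ih]
        cases hd <;> cases hs <;> simp_all
    · simp only [hD]
      by_cases hS : (PySem.Dict.get? (PySem.Dict.mk v.2) "type" == some "status"
            || PySem.Dict.get? (PySem.Dict.mk v.2) "type" == some "select") = true
      · simp only [hS]
        rw [ih]
        cases hd <;> simp_all
      · simp only [Bool.not_eq_true] at hS
        simp only [hS]
        rw [ih]
        cases hd <;> cases hs <;> simp_all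

-- ===== VERDICT (by name: the statement is the Claim_ definition above) =====
theorem is_task_properties_spec : Claim_equal_is_task_properties := by
  intro props _
  unfold Spec_is_task_properties
  match props with
  | none => rfl
  | some d =>
    simp only [is_task_properties, is_task_properties_alt, altLoop_eq]
    cases hD : d.any (fun kv => PySem.Dict.get? (PySem.Dict.mk kv.2) "type" == some "date") <;> simp
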